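-- pv_equiv track=rewrite | github.com/XyzHuy/-DL-Fine-tuning-coding-model | data/solution/Solution1224.py | maxEqualFreq
-- ===== SOURCE A (Python) =====
-- from typing import List
--
-- from collections import Counter
--
-- def maxEqualFreq(nums: List[int]) -> int:
--     count = Counter()
--     freq = Counter()
--     max_len = 0
--
--     for i, num in enumerate(nums):
--         if num in count:
--             freq[count[num]] -= 1
--             if freq[count[num]] == 0:
--                 del freq[count[num]]
--
--         count[num] += 1
--         freq[count[num]] += 1
--
--         # Check conditions for valid prefix
--         if len(freq) == 1:
--             # All numbers have the same frequency
--             key, value = next(iter(freq.items()))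
--             if key == 1 or value == 1:
--                 max_len = i + 1
--
--         elif len(freq) == 2:
--             # There are exactly two different frequencies
--             keys = list(freq.keys())
--             values = list(freq.values())
--
--             if (keys[0] == 1 and values[0] == 1) or (keys[1] == 1 and values[1] == 1):
--                 # One of the frequencies is 1 and it appears only once
--                 max_len = i + 1
--             elif abs(keys[0] - keys[1]) == 1:
--                 # Frequencies differ by 1
--                 if (values[0] == 1 and keys[0] > keys[1]) or (values[1] == 1 and keys[1] > keys[0]):
--                     max_len = i + 1
--
--     return max_len
-- ===== SOURCE B (Python) =====
-- from collections import Counter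
--
--
-- def maxEqualFreq(nums):
--     # Staged brute force: for every prefix length L, recount the prefix from
--     # scratch and accept L when dropping one element equalizes all counts,
--     # tested arithmetically from the count multiset (len/min/max/sum).
--     best = 0
--     for L in range(1, len(nums) + 1):
--         vals = list(Counter(nums[:L]).values())
--         d = len(vals)
--         mx = max(vals)
--         mn = min(vals)
--         if d == 1 or mx == 1 \
--                 or (mn == 1 and L == 1 + mx * (d - 1)) \
--                 or (mx == mn + 1 and L == mx + mn * (d - 1)):
--             best = L
--     return best
-- ===== Notes on version B (the rewrite author's own statement) =====
-- stated objective: simpler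
-- what changed: Replaces A's incremental single pass with two coupled Counter dicts and a key-deletion case analysis by a staged brute force: for each prefix length L it recounts Counter(nums[:L]) from scratch and accepts L by four arithmetic tests on len/min/max of the count multiset; trades A's O(n) for O(n^2) clarity.
import Mathlib
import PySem

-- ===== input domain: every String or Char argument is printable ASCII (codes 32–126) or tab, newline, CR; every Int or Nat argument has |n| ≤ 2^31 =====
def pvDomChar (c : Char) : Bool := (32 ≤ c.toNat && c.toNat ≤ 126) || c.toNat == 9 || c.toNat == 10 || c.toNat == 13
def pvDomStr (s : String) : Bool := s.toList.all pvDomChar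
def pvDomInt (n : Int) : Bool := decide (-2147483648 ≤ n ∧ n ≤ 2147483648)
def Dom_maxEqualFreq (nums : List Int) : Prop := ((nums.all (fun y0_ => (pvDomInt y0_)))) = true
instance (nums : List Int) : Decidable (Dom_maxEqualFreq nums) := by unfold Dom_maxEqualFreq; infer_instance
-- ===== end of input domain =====

-- B replaces A's incremental single pass (two coupled Counter dicts, key deletion, a
-- len(freq)==1/==2 case analysis) by a staged brute force: for every prefix length L it
-- recounts Counter(nums[:L]) from scratch and accepts L by arithmetic tests on
-- len/max/min of the count multiset (objective: simpler; B is O(n^2), not faster).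

-- ===== PORT A =====
-- the per-iteration prefix check of A (len(freq)==1 / ==2 case analysis)
def aCheck (freq : PySem.Dict Int Int) (i maxLen : Int) : Int :=
  if freq.size = 1 then
    match freq.items with
    | (k, v) :: _ => if k = 1 ∨ v = 1 then i + 1 else maxLen
    | [] => maxLen
  else if freq.size = 2 then
    match freq.items with
    | (k1, v1) :: (k2, v2) :: _ =>
      if (k1 = 1 ∧ v1 = 1) ∨ (k2 = 1 ∧ v2 = 1) then i + 1
      else if |k1 - k2| = 1 then
        if (v1 = 1 ∧ k1 > k2) ∨ (v2 = 1 ∧ k2 > k1) then i + 1 else maxLen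
      else maxLen
    | _ => maxLen
  else maxLen

-- one iteration of A's for-loop (state: count, freq, max_len)
def aStep (count freq : PySem.Dict Int Int) (maxLen i num : Int) :
    PySem.Dict Int Int × PySem.Dict Int Int × Int :=
  let freq1 :=
    if count.contains num then
      let f := count.getD num 0
      let freq' := freq.insert f (freq.getD f 0 - 1)
      if freq'.getD f 0 = 0 then freq'.erase f else freq'
    else freq
  let count' := count.insert num (count.getD num 0 + 1)
  let nf := count'.getD num 0
  let freq2 := freq1.insert nf (freq1.getD nf 0 + 1)
  (count', freq2, aCheck freq2 i maxLen)

def aLoop : List Int → Int → PySem.Dict Int Int × PySem.Dict Int Int × Int → Int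
  | [], _, s => s.2.2
  | num :: rest, i, s => aLoop rest (i + 1) (aStep s.1 s.2.1 s.2.2 i num)

def maxEqualFreq (nums : List Int) : Int :=
  aLoop nums 0 (PySem.Dict.empty, PySem.Dict.empty, 0)

-- ===== PORT B =====
-- B's per-prefix acceptance test over vals = list(Counter(nums[:L]).values())
def bCheck (best L : Int) (vals : List Int) : Int :=
  match PySem.List.max? vals (fun y => y), PySem.List.min? vals (fun y => y) with
  | some mx, some mn =>
      if (vals.length : Int) = 1 ∨ mx = 1 ∨
          (mn = 1 ∧ L = 1 + mx * ((vals.length : Int) - 1)) ∨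
          (mx = mn + 1 ∧ L = mx + mn * ((vals.length : Int) - 1)) then L else best
  | _, _ => best   -- max()/min() of an empty list: unreachable, L ≥ 1 makes the prefix nonempty

def maxEqualFreq_alt (nums : List Int) : Int :=
  (PySem.List.pyRange 1 ((nums.length : Int) + 1) 1).foldl
    (fun best L =>
      bCheck best L (PySem.Dict.counter (PySem.List.slice nums none (some L))).values) 0

-- ===== PRECONDITION & SPEC =====
def Spec_maxEqualFreq (nums : List Int) (out : Int) : Prop := out = maxEqualFreq_alt nums
instance (nums : List Int) (out : Int) : Decidable (Spec_maxEqualFreq nums out) := by unfold Spec_maxEqualFreq; infer_instance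

-- ===== CLAIM (what is proved, stated in full; the proofs are below) =====
def Claim_equal_maxEqualFreq : Prop := ∀ (nums : List Int), Dom_maxEqualFreq nums → Spec_maxEqualFreq nums (maxEqualFreq nums)

-- ===== LEMMAS AND PROOFS =====

-- sum of key*value over an association list
def sumKV : List (Int × Int) → Int
  | [] => 0
  | p :: t => p.1 * p.2 + sumKV t

lemma sumKV_append (l : List (Int × Int)) (p : Int × Int) :
    sumKV (l ++ [p]) = sumKV l + p.1 * p.2 := by
  induction l with
  | nil => simp [sumKV]
  | cons q t ih => simp [sumKV, ih]; ring

lemma sumKV_replace (l : List (Int × Int)) (k v w : Int)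
    (hnd : (l.map Prod.fst).Nodup) (hm : (k, v) ∈ l) :
    sumKV (l.map (fun p => if p.1 == k then (k, w) else p)) = sumKV l - k * v + k * w := by
  induction l with
  | nil => simp at hm
  | cons q t ih =>
    simp only [List.map_cons] at hnd
    rcases List.nodup_cons.mp hnd with ⟨hq, hnd'⟩
    rcases List.mem_cons.mp hm with h | h
    · subst h
      simp only [List.map_cons, sumKV, beq_self_eq_true, if_pos]
      have hfix : t.map (fun p => if p.1 == k then (k, w) else p) = t := by
        refine List.map_congr_left (g := id) ?_ |>.trans (List.map_id t)
        intro p hp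
        have : p.1 ≠ k := fun he => hq (he ▸ (List.mem_map.mpr ⟨p, hp, rfl⟩))
        simp [this]
      rw [hfix]; ring
    · have hqk : q.1 ≠ k := by
        intro he
        exact hq (he ▸ (List.mem_map.mpr ⟨(k, v), h, congrArg Prod.fst rfl⟩))
      simp only [List.map_cons, sumKV]
      rw [if_neg (by simp [hqk]), ih hnd' h]; ring

-- sum of the values after replacing the (unique) entry at key k
lemma sumSnd_replace (l : List (Int × Int)) (k v w : Int)
    (hnd : (l.map Prod.fst).Nodup) (hm : (k, v) ∈ l) :
    ((l.map (fun p => if p.1 == k then (k, w) else p)).map Prod.snd).sum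
      = (l.map Prod.snd).sum - v + w := by
  induction l with
  | nil => simp at hm
  | cons q t ih =>
    simp only [List.map_cons] at hnd
    rcases List.nodup_cons.mp hnd with ⟨hq, hnd'⟩
    rcases List.mem_cons.mp hm with h | h
    · subst h
      simp only [List.map_cons, beq_self_eq_true, if_pos]
      have hfix : t.map (fun p => if p.1 == k then (k, w) else p) = t := by
        refine List.map_congr_left (g := id) ?_ |>.trans (List.map_id t)
        intro p hp
        have : p.1 ≠ k := fun he => hq (he ▸ (List.mem_map.mpr ⟨p, hp, rfl⟩))
        simp [this]
      rw [hfix]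
      simp [List.sum_cons]; ring
    · have hqk : q.1 ≠ k := by
        intro he
        exact hq (he ▸ (List.mem_map.mpr ⟨(k, v), h, congrArg Prod.fst rfl⟩))
      simp only [List.map_cons, List.sum_cons]
      rw [if_neg (by simp [hqk]), ih hnd' h]; ring

lemma sumKV_erase' (l : List (Int × Int)) (k v : Int)
    (hnd : (l.map Prod.fst).Nodup) (hm : (k, v) ∈ l) :
    sumKV (l.filter (fun p => !(p.1 == k))) = sumKV l - k * v := by
  induction l with
  | nil => simp at hm
  | cons q t ih =>
    simp only [List.map_cons] at hnd
    rcases List.nodup_cons.mp hnd with ⟨hq, hnd'⟩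
    rcases List.mem_cons.mp hm with h | h
    · subst h
      have hfix : t.filter (fun p => !(p.1 == k)) = t := by
        apply List.filter_eq_self.mpr
        intro p hp
        have : p.1 ≠ k := fun he => hq (he ▸ (List.mem_map.mpr ⟨p, hp, rfl⟩))
        simp [this]
      rw [List.filter_cons_of_neg (by simp), hfix]
      simp only [sumKV]; ring
    · have hqk : q.1 ≠ k := by
        intro he
        exact hq (he ▸ (List.mem_map.mpr ⟨(k, v), h, congrArg Prod.fst rfl⟩))
      rw [List.filter_cons_of_pos (by simp [hqk])]
      simp only [sumKV]
      rw [ih hnd' h]; ring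

lemma find_filter_ne (t : List (Int × Int)) (j k : Int) (hjk : j ≠ k) :
    (t.filter (fun p => !(p.1 == k))).find? (fun p => p.1 == j) = t.find? (fun p => p.1 == j) := by
  induction t with
  | nil => rfl
  | cons q t ih =>
    by_cases hqj : q.1 = j
    · rw [List.filter_cons_of_pos (by simp [hqj, hjk]),
        List.find?_cons_of_pos (by simp [hqj]), List.find?_cons_of_pos (by simp [hqj])]
    · rw [List.find?_cons_of_neg (by simp [hqj])]
      by_cases hqk : q.1 = k
      · rw [List.filter_cons_of_neg (by simp [hqk]), ih]
      · rw [List.filter_cons_of_pos (by simp [hqk]), List.find?_cons_of_neg (by simp [hqj]), ih]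

lemma getD_erase0 (d : PySem.Dict Int Int) (k j : Int) :
    (d.erase k).getD j 0 = if j = k then 0 else d.getD j 0 := by
  by_cases hjk : j = k
  · subst hjk
    have hnone : ((d.erase j).items).find? (fun p => p.1 == j) = none := by
      apply List.find?_eq_none.mpr
      intro p hp
      have := (List.mem_filter.mp hp).2
      simpa using this
    simp [PySem.Dict.getD, PySem.Dict.get?, hnone]
  · simp only [PySem.Dict.getD, PySem.Dict.get?, PySem.Dict.erase, if_neg hjk]
    rw [find_filter_ne _ _ _ hjk]

lemma mem_items_erase (d : PySem.Dict Int Int) (k : Int) (p : Int × Int) :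
    p ∈ (d.erase k).items ↔ p ∈ d.items ∧ p.1 ≠ k := by
  simp [PySem.Dict.erase, List.mem_filter]

lemma nodup_keys_erase (d : PySem.Dict Int Int) (k : Int) (h : d.keys.Nodup) :
    (d.erase k).keys.Nodup := by
  simp only [PySem.Dict.keys, PySem.Dict.erase] at h ⊢
  exact h.sublist (List.Sublist.map _ List.filter_sublist)

lemma mem_items_of_getD_ne (d : PySem.Dict Int Int) (j : Int) (h : d.getD j 0 ≠ 0) :
    (j, d.getD j 0) ∈ d.items := by
  rcases hg : d.get? j with _ | v
  · exact absurd (by simp [PySem.Dict.getD, hg]) h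
  · have hm := PySem.Dict.mem_items_of_get?_eq_some (d := d) hg
    have : d.getD j 0 = v := by simp [PySem.Dict.getD, hg]
    rw [this]; exact hm

-- filter-by-value length after replacing the (unique) entry at key x
lemma filt_len_replace (l : List (Int × Int)) (x f w g : Int)
    (hnd : (l.map Prod.fst).Nodup) (hm : (x, f) ∈ l) :
    (((l.map (fun p => if p.1 == x then (x, w) else p)).filter (fun p => p.2 == g)).length : Int)
      = ((l.filter (fun p => p.2 == g)).length : Int)
        - (if f = g then 1 else 0) + (if w = g then 1 else 0) := by
  induction l with
  | nil => simp at hm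
  | cons q t ih =>
    simp only [List.map_cons] at hnd
    rcases List.nodup_cons.mp hnd with ⟨hq, hnd'⟩
    rcases List.mem_cons.mp hm with h | h
    · subst h
      have hfix : t.map (fun p => if p.1 == x then (x, w) else p) = t := by
        refine List.map_congr_left (g := id) ?_ |>.trans (List.map_id t)
        intro p hp
        have : p.1 ≠ x := fun he => hq (he ▸ (List.mem_map.mpr ⟨p, hp, rfl⟩))
        simp [this]
      simp only [List.map_cons, beq_self_eq_true, if_pos, hfix]
      rw [List.filter_cons, List.filter_cons]
      by_cases hfg : f = g <;> by_cases hwg : w = g <;>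
        simp [hfg, hwg, List.length_cons]
    · have hqx : q.1 ≠ x := by
        intro he
        exact hq (he ▸ (List.mem_map.mpr ⟨(x, f), h, congrArg Prod.fst rfl⟩))
      have IH := ih hnd' h
      simp only [List.map_cons]
      rw [show (if (q.1 == x) = true then (x, w) else q) = q by simp [hqx]]
      rw [List.filter_cons, List.filter_cons]
      by_cases hfg : f = g <;> by_cases hwg : w = g <;> by_cases hqg : q.2 = g <;>
        simp [hfg, hwg, hqg] at IH ⊢ <;> omega

-- the invariant carried along A's loop: count is the Counter of the prefix processed so far
-- (length L) and fA is its frequency-of-frequencies table with zero entries deleted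
def StInv (count fA : PySem.Dict Int Int) (L : Int) : Prop :=
  0 ≤ L ∧
  count.keys.Nodup ∧ fA.keys.Nodup ∧
  (∀ p ∈ fA.items, 1 ≤ p.1 ∧ 1 ≤ p.2) ∧
  sumKV fA.items = L ∧
  (∀ g : Int, fA.getD g 0 = ((count.items.filter (fun p => p.2 == g)).length : Int)) ∧
  (∀ p ∈ count.items, 1 ≤ p.2) ∧
  (count.items.map Prod.snd).sum = L

lemma inv_init : StInv PySem.Dict.empty PySem.Dict.empty 0 := by
  refine ⟨le_refl 0, ?_, ?_, ?_, ?_, ?_, ?_, ?_⟩ <;>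
    simp [PySem.Dict.empty, PySem.Dict.keys, PySem.Dict.getD, PySem.Dict.get?, sumKV]

-- named pieces of A's step (proof helpers)
def aFreq1 (count freq : PySem.Dict Int Int) (num : Int) : PySem.Dict Int Int :=
  if count.contains num then
    let f := count.getD num 0
    let freq' := freq.insert f (freq.getD f 0 - 1)
    if freq'.getD f 0 = 0 then freq'.erase f else freq'
  else freq

def aFreq2 (count freq : PySem.Dict Int Int) (num : Int) : PySem.Dict Int Int :=
  (aFreq1 count freq num).insert (count.getD num 0 + 1)
    ((aFreq1 count freq num).getD (count.getD num 0 + 1) 0 + 1)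

lemma aStep_eq (count freq : PySem.Dict Int Int) (ml i num : Int) :
    aStep count freq ml i num =
      (count.insert num (count.getD num 0 + 1), aFreq2 count freq num,
       aCheck (aFreq2 count freq num) i ml) := by
  simp only [aStep, aFreq2, aFreq1, PySem.Dict.getD_insert_self]

-- the "decrement counter and drop it if zero" pattern of A
def decEr (d : PySem.Dict Int Int) (k : Int) : PySem.Dict Int Int :=
  if (d.insert k (d.getD k 0 - 1)).getD k 0 = 0 then (d.insert k (d.getD k 0 - 1)).erase k
  else d.insert k (d.getD k 0 - 1)

lemma decEr_getD (d : PySem.Dict Int Int) (k j : Int) :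
    (decEr d k).getD j 0 = if j = k then d.getD k 0 - 1 else d.getD j 0 := by
  unfold decEr
  rw [PySem.Dict.getD_insert_self]
  by_cases hj : j = k
  · subst hj
    rw [if_pos rfl]
    split_ifs with hz
    · rw [getD_erase0, if_pos rfl]; omega
    · rw [PySem.Dict.getD_insert_self]
  · rw [if_neg hj]
    split_ifs with hz
    · rw [getD_erase0, if_neg hj, PySem.Dict.getD_insert, if_neg hj]
    · rw [PySem.Dict.getD_insert, if_neg hj]

lemma decEr_mem (d : PySem.Dict Int Int) (k : Int) (p : Int × Int)
    (hp : p ∈ (decEr d k).items) :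
    (p = (k, d.getD k 0 - 1) ∧ d.getD k 0 - 1 ≠ 0) ∨ (p ∈ d.items ∧ p.1 ≠ k) := by
  unfold decEr at hp
  rw [PySem.Dict.getD_insert_self] at hp
  split_ifs at hp with hz
  · obtain ⟨hp1, hp2⟩ := (mem_items_erase _ _ _).mp hp
    rcases (PySem.Dict.mem_items_insert _ _ _ _).mp hp1 with rfl | ⟨hmem, hne⟩
    · exact absurd rfl hp2
    · exact Or.inr ⟨hmem, hne⟩
  · rcases (PySem.Dict.mem_items_insert _ _ _ _).mp hp with rfl | ⟨hmem, hne⟩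
    · exact Or.inl ⟨rfl, hz⟩
    · exact Or.inr ⟨hmem, hne⟩

lemma decEr_nodup (d : PySem.Dict Int Int) (k : Int) (hnd : d.keys.Nodup) :
    (decEr d k).keys.Nodup := by
  unfold decEr
  split_ifs with hz
  · exact nodup_keys_erase _ _ (PySem.Dict.nodup_keys_insert _ _ _ hnd)
  · exact PySem.Dict.nodup_keys_insert _ _ _ hnd

lemma decEr_sum (d : PySem.Dict Int Int) (k : Int) (hnd : d.keys.Nodup)
    (hmem : (k, d.getD k 0) ∈ d.items) :
    sumKV (decEr d k).items = sumKV d.items - k := by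
  have hrep : sumKV (d.insert k (d.getD k 0 - 1)).items = sumKV d.items - k := by
    rw [PySem.Dict.items_insert_of_contains _ _ (by
      rw [PySem.Dict.contains_eq_decide_mem_keys]
      simp [PySem.Dict.keys]
      exact ⟨d.getD k 0, hmem⟩)]
    rw [sumKV_replace d.items k (d.getD k 0) _ hnd hmem]
    ring
  unfold decEr
  rw [PySem.Dict.getD_insert_self]
  split_ifs with hz
  · have hmem' : (k, (0 : Int)) ∈ (d.insert k (d.getD k 0 - 1)).items := by
      have h2 := PySem.Dict.mem_items_insert_self d k (d.getD k 0 - 1)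
      have h3 : ((k, d.getD k 0 - 1) : Int × Int) = (k, 0) := by rw [hz]
      rwa [h3] at h2
    have hitf : ((d.insert k (d.getD k 0 - 1)).erase k).items
        = (d.insert k (d.getD k 0 - 1)).items.filter (fun p => !(p.1 == k)) := rfl
    rw [hitf, sumKV_erase' _ k 0 (PySem.Dict.nodup_keys_insert d k (d.getD k 0 - 1) hnd) hmem']
    rw [hrep]; ring
  · exact hrep

lemma inc_sum (d : PySem.Dict Int Int) (k : Int) (hnd : d.keys.Nodup) :
    sumKV (d.insert k (d.getD k 0 + 1)).items = sumKV d.items + k := by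
  by_cases hc : d.contains k
  · obtain ⟨w, hw⟩ : ∃ w, d.get? k = some w := by
      have hc' := hc
      rw [PySem.Dict.contains_eq_isSome_get?] at hc'
      exact Option.isSome_iff_exists.mp hc'
    have hdw : d.getD k 0 = w := by simp [PySem.Dict.getD, hw]
    have hmem : (k, w) ∈ d.items := PySem.Dict.mem_items_of_get?_eq_some d hw
    rw [PySem.Dict.items_insert_of_contains _ _ hc, sumKV_replace d.items k w _ hnd hmem, hdw]
    ring
  · rw [PySem.Dict.items_insert_of_not_contains _ _ (by simpa using hc), sumKV_append,
      PySem.Dict.getD_of_not_contains _ _ (by simpa using hc)]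
    ring

lemma step_inv (count fA : PySem.Dict Int Int) (L x : Int) (h : StInv count fA L) :
    StInv (count.insert x (count.getD x 0 + 1)) (aFreq2 count fA x) (L + 1) := by
  obtain ⟨h0, hndC, hndA, h3, h6, h7, h9, h8⟩ := h
  have hFnn : ∀ j : Int, 0 ≤ fA.getD j 0 := fun j => by rw [h7 j]; positivity
  rcases hget : count.get? x with _ | v
  · -- x occurs for the first time
    have hcont : count.contains x = false := by
      rw [PySem.Dict.contains_eq_isSome_get?, hget]; rfl
    have hf : count.getD x 0 = 0 := by simp [PySem.Dict.getD, hget]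
    have haf2 : aFreq2 count fA x = fA.insert 1 (fA.getD 1 0 + 1) := by
      simp [aFreq2, aFreq1, hcont, hf]
    rw [hf, haf2]
    simp only [zero_add]
    refine ⟨by omega, PySem.Dict.nodup_keys_insert _ _ _ hndC,
      PySem.Dict.nodup_keys_insert _ _ _ hndA, ?_, ?_, ?_, ?_, ?_⟩
    · intro p hp
      rcases (PySem.Dict.mem_items_insert _ _ _ _).mp hp with rfl | ⟨hmem, _⟩
      · exact ⟨le_refl 1, by have := hFnn 1; omega⟩
      · exact h3 p hmem
    · rw [inc_sum fA 1 hndA]; omega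
    · intro g
      rw [PySem.Dict.items_insert_of_not_contains _ _ hcont, List.filter_append,
        List.length_append]
      by_cases hg : g = 1
      · subst hg
        rw [PySem.Dict.getD_insert_self]
        have hsing : List.filter (fun p => p.2 == (1 : Int)) [(x, (1 : Int))] = [(x, 1)] := by
          simp
        rw [hsing]
        have := h7 1
        simp only [List.length_cons, List.length_nil]
        push_cast
        omega
      · rw [PySem.Dict.getD_insert, if_neg hg]
        have hsing : List.filter (fun p => p.2 == g) [(x, (1 : Int))] = [] := by
          simp [show ¬ ((1 : Int) = g) from fun he => hg (Eq.symm he)]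
        rw [hsing]
        have := h7 g
        simp only [List.length_nil]
        push_cast
        omega
    · intro p hp
      rcases (PySem.Dict.mem_items_insert _ _ _ _).mp hp with rfl | ⟨hmem, _⟩
      · exact le_refl 1
      · exact h9 p hmem
    · rw [PySem.Dict.items_insert_of_not_contains _ _ hcont]
      simp only [List.map_append, List.sum_append, List.map_cons, List.map_nil,
        List.sum_cons, List.sum_nil]
      omega
  · -- x was seen before, with count v
    have hcont : count.contains x = true := by
      rw [PySem.Dict.contains_eq_isSome_get?, hget]; rfl
    have hfv : count.getD x 0 = v := by simp [PySem.Dict.getD, hget]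
    have hmemxv : (x, v) ∈ count.items := PySem.Dict.mem_items_of_get?_eq_some count hget
    have hv1 : 1 ≤ v := h9 _ hmemxv
    have hFv1 : 1 ≤ fA.getD v 0 := by
      rw [h7 v]
      have hmf : (x, v) ∈ count.items.filter (fun p => p.2 == v) :=
        List.mem_filter.mpr ⟨hmemxv, by simp⟩
      have := List.length_pos_of_mem hmf
      omega
    have hmemFv : (v, fA.getD v 0) ∈ fA.items := mem_items_of_getD_ne fA v (by omega)
    have haf1 : aFreq1 count fA x = decEr fA v := by
      simp [aFreq1, decEr, hcont, hfv]
    have haf2 : aFreq2 count fA x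
        = (decEr fA v).insert (v + 1) ((decEr fA v).getD (v + 1) 0 + 1) := by
      unfold aFreq2; rw [haf1, hfv]
    have hgA1 : ∀ j : Int, (decEr fA v).getD j 0
        = if j = v then fA.getD v 0 - 1 else fA.getD j 0 := fun j => decEr_getD fA v j
    have hgA2 : ∀ j : Int, (aFreq2 count fA x).getD j 0 =
        if j = v + 1 then fA.getD (v + 1) 0 + 1
        else if j = v then fA.getD v 0 - 1 else fA.getD j 0 := by
      intro j
      rw [haf2, PySem.Dict.getD_insert, hgA1 (v + 1),
        if_neg (by omega : ¬ (v + 1 : Int) = v), hgA1 j]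
    rw [hfv]
    refine ⟨by omega, PySem.Dict.nodup_keys_insert _ _ _ hndC, ?_, ?_, ?_, ?_, ?_, ?_⟩
    · rw [haf2]
      exact PySem.Dict.nodup_keys_insert _ _ _ (decEr_nodup fA v hndA)
    · intro p hp
      rw [haf2] at hp
      rcases (PySem.Dict.mem_items_insert _ _ _ _).mp hp with rfl | ⟨hmem, _⟩
      · dsimp only
        refine ⟨by omega, ?_⟩
        rw [hgA1 (v + 1), if_neg (by omega : ¬ (v + 1 : Int) = v)]
        have := hFnn (v + 1); omega
      · rcases decEr_mem fA v p hmem with ⟨rfl, hne0⟩ | ⟨hmem', _⟩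
        · exact ⟨by omega, by omega⟩
        · exact h3 p hmem'
    · rw [haf2, inc_sum _ _ (decEr_nodup fA v hndA), decEr_sum fA v hndA hmemFv]
      omega
    · intro g
      have hfl := filt_len_replace count.items x v (v + 1) g hndC hmemxv
      rw [PySem.Dict.items_insert_of_contains _ _ hcont, hfl, hgA2 g, ← h7 g]
      by_cases hg1 : g = v + 1
      · subst hg1
        rw [if_pos rfl, if_neg (by omega : ¬ (v : Int) = v + 1), if_pos rfl]
        omega
      · by_cases hgv : g = v
        · rw [if_neg hg1, if_pos hgv, if_pos hgv.symm, if_neg (by omega : ¬ (v + 1 : Int) = g)]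
          rw [hgv]
          omega
        · rw [if_neg hg1, if_neg hgv, if_neg (fun he => hgv (Eq.symm he)),
            if_neg (fun he => hg1 (Eq.symm he))]
          omega
    · intro p hp
      rcases (PySem.Dict.mem_items_insert _ _ _ _).mp hp with rfl | ⟨hmem, _⟩
      · omega
      · exact h9 p hmem
    · rw [PySem.Dict.items_insert_of_contains _ _ hcont,
        sumSnd_replace count.items x v (v + 1) hndC hmemxv]
      omega

-- pointwise descriptions of a one- / two-entry freq dict
lemma getD_single (fq : PySem.Dict Int Int) (k v j : Int) (hit : fq.items = [(k, v)]) :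
    fq.getD j 0 = if k = j then v else 0 := by
  simp only [PySem.Dict.getD, PySem.Dict.get?, hit]
  by_cases h1 : k = j
  · rw [List.find?_cons_of_pos (by simp [h1])]; simp [h1]
  · rw [List.find?_cons_of_neg (by simp [h1]), if_neg h1]; simp

lemma getD_pair (fq : PySem.Dict Int Int) (k v k2 v2 j : Int)
    (hit : fq.items = [(k, v), (k2, v2)]) :
    fq.getD j 0 = if k = j then v else if k2 = j then v2 else 0 := by
  simp only [PySem.Dict.getD, PySem.Dict.get?, hit]
  by_cases h1 : k = j
  · rw [List.find?_cons_of_pos (by simp [h1])]; simp [h1]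
  · rw [List.find?_cons_of_neg (by simp [h1]), if_neg h1]
    by_cases h2 : k2 = j
    · rw [List.find?_cons_of_pos (by simp [h2])]; simp [h2]
    · rw [List.find?_cons_of_neg (by simp [h2]), if_neg h2]; simp

lemma ite_nest (c1 c2 c3 : Prop) [Decidable c1] [Decidable c2] [Decidable c3] (a b : Int) :
    (if c1 then a else if c2 then (if c3 then a else b) else b) = if c1 ∨ (c2 ∧ c3) then a else b := by
  split_ifs <;> tauto

lemma aCheck_one (fq : PySem.Dict Int Int) (k v i ml : Int) (hit : fq.items = [(k, v)]) :
    aCheck fq i ml = if (k = 1 ∨ v = 1) then i + 1 else ml := by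
  have hsz : fq.size = 1 := by simp [PySem.Dict.size, hit]
  simp only [aCheck, hsz, hit]
  norm_num

lemma aCheck_two (fq : PySem.Dict Int Int) (k v k2 v2 i ml : Int)
    (hit : fq.items = [(k, v), (k2, v2)]) :
    aCheck fq i ml =
      if (((k = 1 ∧ v = 1) ∨ (k2 = 1 ∧ v2 = 1)) ∨
          (|k - k2| = 1 ∧ ((v = 1 ∧ k > k2) ∨ (v2 = 1 ∧ k2 > k)))) then i + 1 else ml := by
  have hsz : fq.size = 2 := by simp [PySem.Dict.size, hit]
  simp only [aCheck, hsz, hit]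
  norm_num
  rw [ite_nest]

lemma aCheck_many (fq : PySem.Dict Int Int) (i ml : Int) (h : 3 ≤ fq.items.length) :
    aCheck fq i ml = ml := by
  have hsz1 : ¬ (fq.size = 1) := by simp only [PySem.Dict.size]; omega
  have hsz2 : ¬ (fq.size = 2) := by simp only [PySem.Dict.size]; omega
  simp only [aCheck, if_neg hsz1, if_neg hsz2]

lemma bCheck_eval (best L : Int) (vals : List Int) (m n : Int)
    (hm : PySem.List.max? vals (fun y => y) = some m)
    (hn : PySem.List.min? vals (fun y => y) = some n) :
    bCheck best L vals =
      if (vals.length : Int) = 1 ∨ m = 1 ∨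
          (n = 1 ∧ L = 1 + m * ((vals.length : Int) - 1)) ∨
          (m = n + 1 ∧ L = m + n * ((vals.length : Int) - 1)) then L else best := by
  unfold bCheck
  rw [hm, hn]

lemma max_spec (l : List Int) (hne : l ≠ []) :
    ∃ m, PySem.List.max? l (fun y => y) = some m ∧ m ∈ l ∧ ∀ x ∈ l, x ≤ m := by
  rcases he : PySem.List.max? l (fun y => y) with _ | m
  · exact absurd ((PySem.List.max?_eq_none_iff l (fun y => y)).mp he) hne
  · exact ⟨m, rfl, PySem.List.max?_mem he, fun x hx => PySem.List.max?_isMax he x hx⟩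

lemma min_spec (l : List Int) (hne : l ≠ []) :
    ∃ n, PySem.List.min? l (fun y => y) = some n ∧ n ∈ l ∧ ∀ x ∈ l, n ≤ x := by
  rcases he : PySem.List.min? l (fun y => y) with _ | n
  · exact absurd ((PySem.List.min?_eq_none_iff l (fun y => y)).mp he) hne
  · exact ⟨n, rfl, PySem.List.min?_mem he, fun x hx => PySem.List.min?_isMin he x hx⟩

lemma sum_le_all (l : List Int) (mx : Int) (h : ∀ x ∈ l, x ≤ mx) :
    l.sum ≤ mx * l.length := by
  induction l with
  | nil => simp
  | cons y t ih =>
    have hy := h y (List.mem_cons_self ..)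
    have ht := ih (fun x hx => h x (List.mem_cons_of_mem _ hx))
    simp only [List.sum_cons, List.length_cons]
    push_cast
    nlinarith

lemma sum_le_one_mem (l : List Int) (mx a : Int) (h : ∀ x ∈ l, x ≤ mx) (ha : a ∈ l) :
    l.sum ≤ mx * l.length - (mx - a) := by
  induction l with
  | nil => simp at ha
  | cons y t ih =>
    have ht : ∀ x ∈ t, x ≤ mx := fun x hx => h x (List.mem_cons_of_mem _ hx)
    rcases List.mem_cons.mp ha with rfl | ha'
    · have := sum_le_all t mx ht
      simp only [List.sum_cons, List.length_cons]
      push_cast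
      nlinarith
    · have hy := h y (List.mem_cons_self ..)
      have := ih ht ha'
      simp only [List.sum_cons, List.length_cons]
      push_cast
      nlinarith

lemma sum_le_two_mem (l : List Int) (mx a b : Int) (h : ∀ x ∈ l, x ≤ mx)
    (ha : a ∈ l) (hb : b ∈ l) (hab : a ≠ b) :
    l.sum ≤ mx * l.length - (mx - a) - (mx - b) := by
  induction l with
  | nil => simp at ha
  | cons y t ih =>
    have ht : ∀ x ∈ t, x ≤ mx := fun x hx => h x (List.mem_cons_of_mem _ hx)
    rcases List.mem_cons.mp ha with rfl | ha'
    · have hb' : b ∈ t := by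
        rcases List.mem_cons.mp hb with h' | h'
        · exact absurd h'.symm hab
        · exact h'
      have := sum_le_one_mem t mx b ht hb'
      simp only [List.sum_cons, List.length_cons]
      push_cast
      nlinarith
    · rcases List.mem_cons.mp hb with rfl | hb'
      · have := sum_le_one_mem t mx a ht ha'
        simp only [List.sum_cons, List.length_cons]
        push_cast
        nlinarith
      · have hy := h y (List.mem_cons_self ..)
        have := ih ht ha' hb'
        simp only [List.sum_cons, List.length_cons]
        push_cast
        nlinarith

lemma length_split_two (l : List Int) (a b : Int) (hab : a ≠ b)
    (h : ∀ x ∈ l, x = a ∨ x = b) :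
    l.length = (l.filter (fun y => y == a)).length + (l.filter (fun y => y == b)).length := by
  induction l with
  | nil => simp
  | cons y t ih =>
    have ht := ih (fun x hx => h x (List.mem_cons_of_mem _ hx))
    rcases h y (List.mem_cons_self ..) with rfl | rfl
    · rw [List.filter_cons_of_pos (by simp), List.filter_cons_of_neg (by simp [hab])]
      simp only [List.length_cons]
      omega
    · rw [List.filter_cons_of_neg (by simpa using hab.symm), List.filter_cons_of_pos (by simp)]
      simp only [List.length_cons]
      omega

lemma check_eq (count fA : PySem.Dict Int Int) (L ml : Int)
    (h : StInv count fA L) (hL : 0 < L) :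
    aCheck fA (L - 1) ml = bCheck ml L count.values := by
  obtain ⟨h0, hndC, hndA, h3, h6, h7, h9, h8⟩ := h
  -- vals is the list of counts of the current prefix
  set vals : List Int := count.items.map Prod.snd with hvals
  have hvalues : count.values = vals := rfl
  rw [hvalues]
  have hL1 : L - 1 + 1 = L := by ring
  -- fA reads off multiplicities inside vals
  have h7v : ∀ g : Int, fA.getD g 0 = ((vals.filter (fun y => y == g)).length : Int) := by
    intro g
    rw [h7 g]
    congr 1
    rw [hvals, List.filter_map]
    rw [List.length_map]
    rfl
  have hvge1 : ∀ y ∈ vals, 1 ≤ y := by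
    intro y hy
    obtain ⟨p, hp, rfl⟩ := List.mem_map.mp hy
    exact h9 p hp
  have hgetD_pos : ∀ y ∈ vals, 1 ≤ fA.getD y 0 := by
    intro y hy
    rw [h7v y]
    have : y ∈ vals.filter (fun z => z == y) := List.mem_filter.mpr ⟨hy, by simp⟩
    have := List.length_pos_of_mem this
    omega
  have hmem_of_getD : ∀ g : Int, 1 ≤ fA.getD g 0 → g ∈ vals := by
    intro g hg
    rw [h7v g] at hg
    have hne : vals.filter (fun z => z == g) ≠ [] := by
      intro he
      rw [he] at hg
      simp at hg
    obtain ⟨y, hy⟩ := List.exists_mem_of_ne_nil _ hne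
    have := List.mem_filter.mp hy
    have hyg : y = g := by simpa using this.2
    exact hyg ▸ this.1
  have hsumv : vals.sum = L := h8
  rcases hitems : fA.items with _ | ⟨⟨k, v⟩, _ | ⟨⟨k2, v2⟩, _ | ⟨p3, restl⟩⟩⟩
  · exfalso
    rw [hitems] at h6
    simp [sumKV] at h6
    omega
  · -- one frequency class: all counts equal k, v of them
    have hgd : ∀ j, fA.getD j 0 = if k = j then v else 0 := fun j => getD_single fA k v j hitems
    obtain ⟨hk1, hv1⟩ := h3 (k, v) (by rw [hitems]; exact List.mem_cons_self ..)
    have hall : ∀ y ∈ vals, y = k := by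
      intro y hy
      have := hgetD_pos y hy
      rw [hgd y] at this
      by_cases hky : k = y
      · exact hky.symm
      · rw [if_neg hky] at this; omega
    have hkmem : k ∈ vals := hmem_of_getD k (by rw [hgd k, if_pos rfl]; omega)
    have hne : vals ≠ [] := List.ne_nil_of_mem hkmem
    obtain ⟨m, hmax, hmmem, _⟩ := max_spec vals hne
    obtain ⟨n, hmin, hnmem, _⟩ := min_spec vals hne
    have hmk : m = k := hall m hmmem
    have hnk : n = k := hall n hnmem
    have hlen : (vals.length : Int) = v := by
      have := h7v k
      rw [hgd k, if_pos rfl, List.filter_eq_self.mpr (fun y hy => by simp [hall y hy])] at this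
      omega
    rw [aCheck_one fA k v (L - 1) ml hitems, hL1, bCheck_eval ml L vals m n hmax hmin,
      hmk, hnk, hlen]
    refine if_congr ?_ rfl rfl
    constructor
    · rintro (hk | hv)
      · exact Or.inr (Or.inl hk)
      · exact Or.inl hv
    · rintro (hv | hk | ⟨hk, _⟩ | ⟨hkk, _⟩)
      · exact Or.inr hv
      · exact Or.inl hk
      · exact Or.inl hk
      · omega
  · -- two frequency classes
    have hgd : ∀ j, fA.getD j 0 = if k = j then v else if k2 = j then v2 else 0 :=
      fun j => getD_pair fA k v k2 v2 j hitems
    obtain ⟨hk1, hv1⟩ := h3 (k, v) (by rw [hitems]; exact List.mem_cons_self ..)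
    obtain ⟨hk21, hv21⟩ := h3 (k2, v2) (by rw [hitems]; simp)
    have hne12 : k ≠ k2 := by
      have := hndA
      simp [PySem.Dict.keys, hitems] at this
      exact this
    have hall : ∀ y ∈ vals, y = k ∨ y = k2 := by
      intro y hy
      have := hgetD_pos y hy
      rw [hgd y] at this
      by_cases h1 : k = y
      · exact Or.inl h1.symm
      · rw [if_neg h1] at this
        by_cases h2 : k2 = y
        · exact Or.inr h2.symm
        · rw [if_neg h2] at this; omega
    have hkmem : k ∈ vals := hmem_of_getD k (by rw [hgd k, if_pos rfl]; omega)
    have hk2mem : k2 ∈ vals := hmem_of_getD k2 (by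
      rw [hgd k2, if_neg hne12, if_pos rfl]; omega)
    have hne : vals ≠ [] := List.ne_nil_of_mem hkmem
    obtain ⟨m, hmax, hmmem, hmub⟩ := max_spec vals hne
    obtain ⟨n, hmin, hnmem, hnlb⟩ := min_spec vals hne
    have hlen : (vals.length : Int) = v + v2 := by
      have hsplit := length_split_two vals k k2 hne12 hall
      have e1 := h7v k
      have e2 := h7v k2
      rw [hgd k, if_pos rfl] at e1
      rw [hgd k2, if_neg hne12, if_pos rfl] at e2
      omega
    have hLkv : k * v + k2 * v2 = L := by
      rw [hitems] at h6; simp [sumKV] at h6; linarith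
    have hm12 : m = k ∨ m = k2 := hall m hmmem
    have hn12 : n = k ∨ n = k2 := hall n hnmem
    have hkm : k ≤ m := hmub k hkmem
    have hk2m : k2 ≤ m := hmub k2 hk2mem
    have hnk : n ≤ k := hnlb k hkmem
    have hnk2 : n ≤ k2 := hnlb k2 hk2mem
    rw [aCheck_two fA k v k2 v2 (L - 1) ml hitems, hL1, bCheck_eval ml L vals m n hmax hmin,
      hlen]
    refine if_congr ?_ rfl rfl
    rcases lt_or_gt_of_ne hne12 with hlt | hlt
    · -- k < k2 : m = k2, n = k
      have hmk2 : m = k2 := by rcases hm12 with h' | h' <;> omega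
      have hnk' : n = k := by rcases hn12 with h' | h' <;> omega
      rw [hmk2, hnk']
      have habs : |k - k2| = k2 - k := by rw [abs_sub_comm]; exact abs_of_pos (by omega)
      rw [habs]
      constructor
      · rintro ((⟨ha, hb⟩ | ⟨ha, hb⟩) | ⟨hadj, (⟨hb, hc⟩ | ⟨hb, hc⟩)⟩)
        · refine Or.inr (Or.inr (Or.inl ⟨ha, ?_⟩))
          rw [← hLkv, ha, hb]; ring
        · omega
        · omega
        · refine Or.inr (Or.inr (Or.inr ⟨by omega, ?_⟩))
          rw [← hLkv, hb, show k2 = k + 1 by omega]; ring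
      · rintro (hd | hm1 | ⟨ha, heq⟩ | ⟨hadj, heq⟩)
        · omega
        · omega
        · -- k = 1 and L = 1 + k2*(v+v2-1) forces v = 1
          have hlin : v - 1 = k2 * (v - 1) := by
            rw [← hLkv, ha] at heq
            linear_combination heq
          have hz : (v - 1) * (k2 - 1) = 0 := by linear_combination -hlin
          rcases mul_eq_zero.mp hz with hz1 | hz2
          · exact Or.inl (Or.inl ⟨ha, by omega⟩)
          · omega
        · -- k2 = k + 1 and L = k2 + k*(v+v2-1) forces v2 = 1
          have hv2 : v2 = 1 := by
            rw [← hLkv, show k2 = k + 1 by omega] at heq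
            nlinarith [heq]
          refine Or.inr ⟨habs ▸ (by omega : |k - k2| = 1), Or.inr ⟨hv2, by omega⟩⟩
    · -- k2 < k : m = k, n = k2  (mirror)
      have hmk' : m = k := by rcases hm12 with h' | h' <;> omega
      have hnk2' : n = k2 := by rcases hn12 with h' | h' <;> omega
      rw [hmk', hnk2']
      have habs : |k - k2| = k - k2 := abs_of_pos (by omega)
      rw [habs]
      constructor
      · rintro ((⟨ha, hb⟩ | ⟨ha, hb⟩) | ⟨hadj, (⟨hb, hc⟩ | ⟨hb, hc⟩)⟩)
        · omega
        · refine Or.inr (Or.inr (Or.inl ⟨ha, ?_⟩))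
          rw [← hLkv, ha, hb]; ring
        · refine Or.inr (Or.inr (Or.inr ⟨by omega, ?_⟩))
          rw [← hLkv, hb, show k = k2 + 1 by omega]; ring
        · omega
      · rintro (hd | hm1 | ⟨ha, heq⟩ | ⟨hadj, heq⟩)
        · omega
        · omega
        · have hlin : v2 - 1 = k * (v2 - 1) := by
            rw [← hLkv, ha] at heq
            linear_combination heq
          have hz : (v2 - 1) * (k - 1) = 0 := by linear_combination -hlin
          rcases mul_eq_zero.mp hz with hz1 | hz2
          · exact Or.inl (Or.inr ⟨ha, by omega⟩)
          · omega
        · have hv1' : v = 1 := by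
            rw [← hLkv, show k = k2 + 1 by omega] at heq
            nlinarith [heq]
          refine Or.inr ⟨habs ▸ (by omega : |k - k2| = 1), Or.inl ⟨hv1', by omega⟩⟩
  · -- three or more frequency classes: both sides keep ml
    have hlen3 : 3 ≤ fA.items.length := by rw [hitems]; simp
    -- the three first entries of fA give three distinct keys
    have hmem1 : ((k, v) : Int × Int) ∈ fA.items := by rw [hitems]; exact List.mem_cons_self ..
    have hmem2 : ((k2, v2) : Int × Int) ∈ fA.items := by rw [hitems]; simp
    have hmem3 : p3 ∈ fA.items := by rw [hitems]; simp
    have hnd3 : k ≠ k2 ∧ k ≠ p3.1 ∧ k2 ≠ p3.1 := by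
      have := hndA
      simp [PySem.Dict.keys, hitems, List.nodup_cons] at this
      tauto
    have hgk : fA.getD k 0 = v := PySem.Dict.getD_of_mem_items fA hmem1 hndA 0
    have hgk2 : fA.getD k2 0 = v2 := PySem.Dict.getD_of_mem_items fA hmem2 hndA 0
    have hgp3 : fA.getD p3.1 0 = p3.2 := PySem.Dict.getD_of_mem_items fA hmem3 hndA 0
    obtain ⟨_, hv1⟩ := h3 _ hmem1
    obtain ⟨_, hv21⟩ := h3 _ hmem2
    obtain ⟨_, hv31⟩ := h3 _ hmem3
    have hc1 : k ∈ vals := hmem_of_getD k (by omega)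
    have hc2 : k2 ∈ vals := hmem_of_getD k2 (by omega)
    have hc3 : p3.1 ∈ vals := hmem_of_getD p3.1 (by omega)
    have hne : vals ≠ [] := List.ne_nil_of_mem hc1
    obtain ⟨m, hmax, hmmem, hmub⟩ := max_spec vals hne
    obtain ⟨n, hmin, hnmem, hnlb⟩ := min_spec vals hne
    rw [aCheck_many fA (L - 1) ml hlen3, bCheck_eval ml L vals m n hmax hmin]
    split_ifs with hcond
    case neg => rfl
    exfalso
    rcases hcond with hd | hm1 | ⟨hn1, heq⟩ | ⟨hmn, heq⟩
    · -- length 1 yet two distinct members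
      have : vals.length = 1 := by omega
      obtain ⟨z, hz⟩ := List.length_eq_one_iff.mp this
      rw [hz] at hc1 hc2
      simp at hc1 hc2
      omega
    · have e1 := hmub k hc1
      have e2 := hmub k2 hc2
      have f1 := hvge1 k hc1
      have f2 := hvge1 k2 hc2
      omega
    · -- n = 1 and L = 1 + m*(d-1): impossible with a third class
      -- pick a member e of vals with e ≠ 1 and e ≠ m
      obtain ⟨hd1, hd2, hd3⟩ := hnd3
      have hpick : ∃ e, e ∈ vals ∧ e ≠ 1 ∧ e ≠ m := by
        by_cases hA : k ≠ 1 ∧ k ≠ m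
        · exact ⟨k, hc1, hA.1, hA.2⟩
        · by_cases hB : k2 ≠ 1 ∧ k2 ≠ m
          · exact ⟨k2, hc2, hB.1, hB.2⟩
          · rcases not_and_or.mp hA with hA' | hA' <;> rcases not_and_or.mp hB with hB' | hB' <;>
              rw [not_ne_iff] at hA' hB'
            · exact absurd (hA'.trans hB'.symm) hd1
            · exact ⟨p3.1, hc3, by omega, by omega⟩
            · exact ⟨p3.1, hc3, by omega, by omega⟩
            · exact absurd (hA'.trans hB'.symm) hd1
      obtain ⟨e, hemem, he1, hem⟩ := hpick
      have h1mem : (1 : Int) ∈ vals := hn1 ▸ hnmem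
      have heub : e ≤ m := hmub e hemem
      have helb : 1 ≤ e := hvge1 e hemem
      have hs := sum_le_two_mem vals m 1 e hmub h1mem hemem (by omega)
      rw [hsumv] at hs
      have hme : e ≤ m - 1 := by omega
      nlinarith [hs, heq, hme]
    · -- m = n + 1: three distinct members in a 2-element range
      have e1 := hmub k hc1
      have e2 := hmub k2 hc2
      have e3 := hmub p3.1 hc3
      have f1 := hnlb k hc1
      have f2 := hnlb k2 hc2
      have f3 := hnlb p3.1 hc3
      omega

lemma counter_snoc (pre : List Int) (x : Int) :
    PySem.Dict.counter (pre ++ [x])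
      = (PySem.Dict.counter pre).insert x ((PySem.Dict.counter pre).getD x 0 + 1) := by
  rw [← PySem.Dict.foldl_insert_getD_add_one_eq_counter,
      ← PySem.Dict.foldl_insert_getD_add_one_eq_counter, List.foldl_append]
  rfl

lemma loop_eq (nums : List Int) : ∀ (rest pre : List Int) (fA : PySem.Dict Int Int) (ml : Int),
    nums = pre ++ rest →
    StInv (PySem.Dict.counter pre) fA (pre.length : Int) →
    aLoop rest (pre.length : Int) (PySem.Dict.counter pre, fA, ml) =
      (PySem.List.pyRange ((pre.length : Int) + 1) ((nums.length : Int) + 1) 1).foldl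
        (fun best L =>
          bCheck best L (PySem.Dict.counter (PySem.List.slice nums none (some L))).values) ml := by
  intro rest
  induction rest with
  | nil =>
    intro pre fA ml hsplit hinv
    have hpre : nums.length = pre.length := by rw [hsplit]; simp
    rw [hpre, PySem.List.pyRange_one_eq_nil (le_refl _)]
    rfl
  | cons x t ih =>
    intro pre fA ml hsplit hinv
    have hlen : nums.length = pre.length + t.length + 1 := by
      rw [hsplit]; simp [List.length_append]; omega
    simp only [aLoop]
    rw [aStep_eq]
    have hinv' := step_inv (PySem.Dict.counter pre) fA (pre.length : Int) x hinv
    rw [← counter_snoc pre x] at hinv'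
    have hml : aCheck (aFreq2 (PySem.Dict.counter pre) fA x) ((pre.length : Int)) ml
        = bCheck ml ((pre.length : Int) + 1) (PySem.Dict.counter (pre ++ [x])).values := by
      have hc := check_eq (PySem.Dict.counter (pre ++ [x])) (aFreq2 (PySem.Dict.counter pre) fA x)
        ((pre.length : Int) + 1) ml hinv' (by omega)
      rw [show (pre.length : Int) + 1 - 1 = (pre.length : Int) by ring] at hc
      exact hc
    have hlt : (pre.length : Int) + 1 < (nums.length : Int) + 1 := by omega
    rw [PySem.List.pyRange_one_cons hlt, List.foldl_cons]
    have hslice : PySem.List.slice nums none (some ((pre.length : Int) + 1)) = pre ++ [x] := by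
      have hcast : ((pre.length : Int) + 1) = ((pre.length + 1 : Nat) : Int) := by push_cast; ring
      rw [hcast, PySem.List.slice_to_natCast, hsplit, List.take_append]
      simp
    simp only [hslice]
    have hlen2 : ((pre ++ [x]).length : Int) = (pre.length : Int) + 1 := by simp
    have IH := ih (pre ++ [x]) (aFreq2 (PySem.Dict.counter pre) fA x)
      (bCheck ml ((pre.length : Int) + 1) (PySem.Dict.counter (pre ++ [x])).values)
      (by rw [hsplit]; simp)
      (by rw [hlen2]; exact hinv')
    rw [hlen2] at IH
    rw [← counter_snoc pre x, hml]
    exact IH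

-- ===== VERDICT (by name: the statement is the Claim_ definition above) =====
theorem maxEqualFreq_spec : Claim_equal_maxEqualFreq := by
  intro nums _
  unfold Spec_maxEqualFreq maxEqualFreq maxEqualFreq_alt
  have h := loop_eq nums nums [] PySem.Dict.empty 0 rfl (by simpa using inv_init)
  simpa using h
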